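-- pv_equiv track=rewrite | github.com/ShannonHung/Antigravity-YAML-Generator | yaml_generator.py | _apply_yaml_list_prefix
-- ===== SOURCE A (Python) =====
-- from typing import List, Dict, Any, Optional, Union
--
-- def _apply_yaml_list_prefix(child_lines: List[str]) -> List[str]:
--     """
--     Injects the YAML list indicator '- ' into the first valid line of a generated block.
--
--     Why: When schema children of a list node are recursively generated, they return as standard
--     objects. This function retroactively aligns them into a YAML array by replacing the starting
--     spaces of the first non-comment line with the array bullet '- '.
--     """
--     lines = []
--     list_item_started = False
--     for cl in child_lines:
--         if not cl.strip():
--             continue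
--         if not list_item_started and not cl.lstrip().startswith("#"):
--             leading_spaces = len(cl) - len(cl.lstrip(' '))
--             lines.append(cl[:leading_spaces] + "- " + cl.lstrip(' '))
--             list_item_started = True
--         else:
--             lines.append(cl if cl.lstrip().startswith("#") and not list_item_started else f"  {cl}")
--     return lines
-- ===== SOURCE B (Python) =====
-- from typing import List
--
-- def _apply_yaml_list_prefix(child_lines: List[str]) -> List[str]:
--     # Split-point decomposition: filter non-blank lines, locate the pivot
--     # (first non-comment line), then map each line by its position.
--     filtered = [cl for cl in child_lines if cl.strip()]
--     pivot = next((i for i, cl in enumerate(filtered)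
--                   if not cl.lstrip().startswith("#")), len(filtered))
--     out = []
--     for i, cl in enumerate(filtered):
--         if i < pivot:
--             out.append(cl)
--         elif i == pivot:
--             stripped = cl.lstrip(' ')
--             out.append(cl[:len(cl) - len(stripped)] + "- " + stripped)
--         else:
--             out.append("  " + cl)
--     return out
-- ===== Notes on version B (the rewrite author's own statement) =====
-- stated objective: alternative
-- what changed: Replaces A's single stateful flag-driven pass with a filter-then-pivot decomposition: build the non-blank lines, find the first non-comment index, then map each line purely by its position relative to that pivot.
import Mathlib
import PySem

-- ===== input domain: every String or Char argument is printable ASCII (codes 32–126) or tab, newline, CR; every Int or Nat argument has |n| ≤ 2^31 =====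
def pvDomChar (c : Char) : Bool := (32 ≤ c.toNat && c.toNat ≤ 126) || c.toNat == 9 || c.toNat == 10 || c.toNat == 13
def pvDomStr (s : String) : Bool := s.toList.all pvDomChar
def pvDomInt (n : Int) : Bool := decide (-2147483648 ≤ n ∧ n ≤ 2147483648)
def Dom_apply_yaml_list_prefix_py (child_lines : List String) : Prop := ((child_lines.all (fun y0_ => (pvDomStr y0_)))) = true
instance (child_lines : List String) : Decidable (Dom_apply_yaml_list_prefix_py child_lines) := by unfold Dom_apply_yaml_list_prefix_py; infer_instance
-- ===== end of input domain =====

-- B replaces A's stateful flag-driven pass by a filter / pivot-index / position-map decomposition (objective: alternative, same cost).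

-- ===== PORT A =====
-- cl.lstrip(' ') strips only leading space characters: exact as dropWhile (· == ' ')
def pvLstripSpace (cs : List Char) : List Char := cs.dropWhile (· == ' ')

-- one iteration of A's for-loop; state = (lines, list_item_started)
def pvStepA (st : List String × Bool) (cl : String) : List String × Bool :=
  let cs := cl.toList
  if (PySem.Chars.strip cs).isEmpty then st
  else if st.2 = false ∧ PySem.Chars.startswith (PySem.Chars.lstrip cs) ['#'] = false then
    let stripped := pvLstripSpace cs
    let leading : Int := (cs.length : Int) - (stripped.length : Int)
    (st.1 ++ [String.ofList (PySem.List.slice cs none (some leading) ++ "- ".toList ++ stripped)], true)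
  else
    (st.1 ++ [if PySem.Chars.startswith (PySem.Chars.lstrip cs) ['#'] = true ∧ st.2 = false
              then cl else String.ofList ("  ".toList ++ cs)], st.2)

def apply_yaml_list_prefix_py (child_lines : List String) : List String :=
  (child_lines.foldl pvStepA ([], false)).1

-- ===== PORT B =====
def pvNonblank (cl : String) : Bool := !(PySem.Chars.strip cl.toList).isEmpty

def pvIsComment (cl : String) : Bool := PySem.Chars.startswith (PySem.Chars.lstrip cl.toList) ['#']

-- cl[:len(cl)-len(stripped)] + "- " + stripped  with stripped = cl.lstrip(' ')
def pvBullet (cl : String) : String :=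
  let cs := cl.toList
  let stripped := pvLstripSpace cs
  String.ofList (PySem.List.slice cs none (some ((cs.length : Int) - (stripped.length : Int))) ++ "- ".toList ++ stripped)

def pvIndent (cl : String) : String := String.ofList ("  ".toList ++ cl.toList)

def apply_yaml_list_prefix_py_alt (child_lines : List String) : List String :=
  let filtered := child_lines.filter pvNonblank
  let pivot := filtered.findIdx (fun cl => !pvIsComment cl)
  filtered.mapIdx (fun i cl => if i < pivot then cl else if i = pivot then pvBullet cl else pvIndent cl)

-- ===== PRECONDITION & SPEC =====
def Spec_apply_yaml_list_prefix_py (child_lines : List String) (out : List String) : Prop := out = apply_yaml_list_prefix_py_alt child_lines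
instance (child_lines : List String) (out : List String) : Decidable (Spec_apply_yaml_list_prefix_py child_lines out) := by unfold Spec_apply_yaml_list_prefix_py; infer_instance

-- ===== CLAIM (what is proved, stated in full; the proofs are below) =====
def Claim_equal_apply_yaml_list_prefix_py : Prop := ∀ (child_lines : List String), Dom_apply_yaml_list_prefix_py child_lines → Spec_apply_yaml_list_prefix_py child_lines (apply_yaml_list_prefix_py child_lines)

-- ===== LEMMAS AND PROOFS =====

lemma pvMapIdx_congr (xs : List String) (f g : Nat → String → String)
    (h : ∀ i x, f i x = g i x) : xs.mapIdx f = xs.mapIdx g := by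
  congr 1; funext i x; exact h i x

lemma pvMapIdx_eq_map (xs : List String) (f : Nat → String → String)
    (h : ∀ i x, f i x = pvIndent x) : xs.mapIdx f = xs.map pvIndent := by
  induction xs generalizing f with
  | nil => simp
  | cons y ys ih => simp [List.mapIdx_cons, h, ih (fun i => f (i + 1)) (fun i x => h _ x)]

-- B on a leading blank line: dropped
lemma pvAlt_blank (cl : String) (ls : List String) (h : pvNonblank cl = false) :
    apply_yaml_list_prefix_py_alt (cl :: ls) = apply_yaml_list_prefix_py_alt ls := by
  simp [apply_yaml_list_prefix_py_alt, h]

-- B on a leading comment line: kept unchanged, pivot shifts by one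
lemma pvAlt_comment (cl : String) (ls : List String) (h : pvNonblank cl = true)
    (hc : pvIsComment cl = true) :
    apply_yaml_list_prefix_py_alt (cl :: ls) = cl :: apply_yaml_list_prefix_py_alt ls := by
  simp only [apply_yaml_list_prefix_py_alt]
  rw [List.filter_cons_of_pos h, List.findIdx_cons]
  simp only [hc, Bool.not_true, cond_false, List.mapIdx_cons, Nat.zero_lt_succ, if_pos]
  congr 1
  apply pvMapIdx_congr
  intro i x
  simp only [Nat.add_lt_add_iff_right, Nat.add_right_cancel_iff]

-- B on a leading non-comment line: it is the pivot, the rest is indented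
lemma pvAlt_pivot (cl : String) (ls : List String) (h : pvNonblank cl = true)
    (hc : pvIsComment cl = false) :
    apply_yaml_list_prefix_py_alt (cl :: ls)
      = pvBullet cl :: (ls.filter pvNonblank).map pvIndent := by
  simp only [apply_yaml_list_prefix_py_alt]
  rw [List.filter_cons_of_pos h, List.findIdx_cons]
  simp only [hc, Bool.not_false, cond_true, List.mapIdx_cons, Nat.lt_irrefl, if_false, if_pos]
  congr 1
  exact pvMapIdx_eq_map _ _ (fun _ _ => rfl)

-- once the flag is set, A appends "  " + cl for every remaining non-blank line
lemma pvFoldA_true (ls : List String) (acc : List String) :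
    (ls.foldl pvStepA (acc, true)).1 = acc ++ (ls.filter pvNonblank).map pvIndent := by
  induction ls generalizing acc with
  | nil => simp
  | cons cl ls ih =>
      by_cases h : pvNonblank cl
      · have hs : (PySem.Chars.strip cl.toList).isEmpty = false := by
          simpa [pvNonblank] using h
        simp [List.foldl_cons, pvStepA, hs, h, ih, pvIndent]
      · have hs : (PySem.Chars.strip cl.toList).isEmpty = true := by
          simpa [pvNonblank] using h
        simp [List.foldl_cons, pvStepA, hs, h, ih]

-- before the flag is set, A's loop computes exactly B's decomposition
lemma pvFoldA_false (ls : List String) (acc : List String) :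
    (ls.foldl pvStepA (acc, false)).1 = acc ++ apply_yaml_list_prefix_py_alt ls := by
  induction ls generalizing acc with
  | nil => simp [apply_yaml_list_prefix_py_alt]
  | cons cl ls ih =>
      rw [List.foldl_cons]
      by_cases h : pvNonblank cl
      · have hs : (PySem.Chars.strip cl.toList).isEmpty = false := by
          simpa [pvNonblank] using h
        by_cases hc : pvIsComment cl
        · have hc' : PySem.Chars.startswith (PySem.Chars.lstrip cl.toList) ['#'] = true := hc
          have hstep : pvStepA (acc, false) cl = (acc ++ [cl], false) := by
            simp [pvStepA, hs, hc']
          rw [hstep, ih, pvAlt_comment cl ls h hc]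
          simp
        · have hc' : PySem.Chars.startswith (PySem.Chars.lstrip cl.toList) ['#'] = false := by
            simpa [pvIsComment] using hc
          have hstep : pvStepA (acc, false) cl = (acc ++ [pvBullet cl], true) := by
            simp [pvStepA, hs, hc', pvBullet, pvLstripSpace]
          rw [hstep, pvFoldA_true, pvAlt_pivot cl ls h hc']
          simp
      · have hs : (PySem.Chars.strip cl.toList).isEmpty = true := by
          simpa [pvNonblank] using h
        have hstep : pvStepA (acc, false) cl = (acc, false) := by
          simp [pvStepA, hs]
        rw [hstep, ih, pvAlt_blank cl ls (by simpa using h)]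

-- ===== VERDICT (by name: the statement is the Claim_ definition above) =====
theorem apply_yaml_list_prefix_py_spec : Claim_equal_apply_yaml_list_prefix_py := by
  intro child_lines _
  unfold Spec_apply_yaml_list_prefix_py apply_yaml_list_prefix_py
  simpa using pvFoldA_false child_lines []
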